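-- pv_equiv track=rewrite | github.com/IIC2233-2015-1/syllabus | Actividades en Clases/Actividad 14/AC14.py | encontrar_operaciones
-- ===== SOURCE A (Python) =====
-- import enum
--
-- class Operaciones(enum.Enum):
--     suma = ('+', 'plus')
--     resta = ('-', 'minus')
--     multiplicacion = ('*', 'times')
--     division = ('/', 'divided')
--     modulo = ('%', 'module')
--
--     def encontrar_operacion(operacion_str):
--         for operacion in Operaciones:
--             if operacion.value[0] == operacion_str:
--                 return operacion
--
--     def is_operacion(value):
--         for operacion in Operaciones:
--             if operacion.value[0] == value:
--                 return True
--         return False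
--
-- def encontrar_operaciones(declaracion):
--     operaciones = []
--     operandos = []
--     last = 0
--     for i in range(len(declaracion)):
--         if Operaciones.is_operacion(declaracion[i]):
--             operandos.append(declaracion[last:i])
--             operaciones.append(declaracion[i])
--             last = i + 1
--     if last != len(declaracion):
--         operandos.append(declaracion[last:])
--     return operaciones, operandos
-- ===== SOURCE B (Python) =====
-- def encontrar_operaciones(declaracion):
--     operaciones = []
--     operandos = []
--     actual = ''
--     for caracter in declaracion:
--         if caracter in '+-*/%':
--             operaciones.append(caracter)
--             operandos.append(actual)
--             actual = ''
--         else: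
--             actual += caracter
--     if actual:
--         operandos.append(actual)
--     return operaciones, operandos
-- ===== Notes on version B (the rewrite author's own statement) =====
-- stated objective: faster
-- what changed: Replaces the index/cursor scan that repeatedly slices the string at declaracion[last:i] and asks the enum table whether each character is an operator by a single direct pass over the characters that accumulates the current operand in a string buffer and tests membership in the five-operator string.
import Mathlib
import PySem

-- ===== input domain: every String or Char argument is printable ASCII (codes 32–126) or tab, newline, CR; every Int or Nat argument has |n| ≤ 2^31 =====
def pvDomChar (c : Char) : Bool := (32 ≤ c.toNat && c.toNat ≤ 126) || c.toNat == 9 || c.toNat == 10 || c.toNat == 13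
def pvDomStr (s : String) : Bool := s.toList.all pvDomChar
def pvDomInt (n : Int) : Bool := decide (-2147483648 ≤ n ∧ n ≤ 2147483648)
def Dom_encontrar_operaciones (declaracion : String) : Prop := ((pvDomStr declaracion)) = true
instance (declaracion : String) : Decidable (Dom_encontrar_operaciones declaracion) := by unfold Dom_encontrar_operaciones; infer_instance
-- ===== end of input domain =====

-- B replaces A's index/cursor scan (slicing declaracion[last:i]) by a single character pass
-- with a string accumulator: simpler, no index bookkeeping. Return values only; neither mutates.

-- ===== PORT A =====

-- port of Operaciones.is_operacion: scan the enum's operator symbols in declaration order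
def pvIsOperacionA : List Char → Char → Bool
  | [], _ => false
  | o :: rest, c => if o == c then true else pvIsOperacionA rest c

-- the loop body of A: state (operaciones, operandos, last), i runs over range(len(declaracion))
def pvStepA (cs : List Char) (st : List String × List String × Int) (i : Int) :
    List String × List String × Int :=
  match st with
  | (ops, opnds, last) =>
    let c := PySem.List.pyGetD cs i ' '
    if pvIsOperacionA ['+', '-', '*', '/', '%'] c then
      (ops ++ [String.ofList [c]],
       opnds ++ [String.ofList (PySem.List.slice cs (some last) (some i))],
       i + 1)
    else (ops, opnds, last)

def encontrar_operaciones (declaracion : String) : List String × List String :=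
  let cs := declaracion.toList
  match (PySem.List.pyRange 0 (PySem.Str.len declaracion) 1).foldl (pvStepA cs) ([], [], 0) with
  | (ops, opnds, last) =>
    if last ≠ PySem.Str.len declaracion then
      (ops, opnds ++ [String.ofList (PySem.List.slice cs (some last) none)])
    else (ops, opnds)

-- ===== PORT B =====

-- the loop body of B: state (operaciones, operandos, actual), folding over the characters
def pvStepB (st : List String × List String × List Char) (c : Char) :
    List String × List String × List Char :=
  match st with
  | (ops, opnds, actual) =>
    if PySem.Chars.isIn [c] ['+', '-', '*', '/', '%'] then
      (ops ++ [String.ofList [c]], opnds ++ [String.ofList actual], [])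
    else (ops, opnds, actual ++ [c])

def encontrar_operaciones_alt (declaracion : String) : List String × List String :=
  match declaracion.toList.foldl pvStepB ([], [], []) with
  | (ops, opnds, actual) =>
    if actual ≠ [] then (ops, opnds ++ [String.ofList actual]) else (ops, opnds)

-- ===== PRECONDITION & SPEC =====
def Spec_encontrar_operaciones (declaracion : String) (out : List String × List String) : Prop := out = encontrar_operaciones_alt declaracion
instance (declaracion : String) (out : List String × List String) : Decidable (Spec_encontrar_operaciones declaracion out) := by unfold Spec_encontrar_operaciones; infer_instance

-- ===== CLAIM (what is proved, stated in full; the proofs are below) =====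
def Claim_equal_encontrar_operaciones : Prop := ∀ (declaracion : String), Dom_encontrar_operaciones declaracion → Spec_encontrar_operaciones declaracion (encontrar_operaciones declaracion)

-- ===== LEMMAS AND PROOFS =====

theorem pvIsOperacionA_eq_mem (L : List Char) (c : Char) :
    pvIsOperacionA L c = decide (c ∈ L) := by
  induction L with
  | nil => simp [pvIsOperacionA]
  | cons o rest ih =>
    simp only [pvIsOperacionA, ih, List.mem_cons]
    by_cases h : o = c
    · subst h; simp
    · simp [h, Ne.symm h]

theorem isOp_eq (c : Char) :
    pvIsOperacionA ['+', '-', '*', '/', '%'] c = PySem.Chars.isIn [c] ['+', '-', '*', '/', '%'] := by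
  rw [pvIsOperacionA_eq_mem]
  by_cases h : c ∈ ['+', '-', '*', '/', '%']
  · simp [h, (PySem.Chars.isIn_iff_infix [c] _).mpr ((List.singleton_infix_iff c _).mpr h)]
  · have h2 : PySem.Chars.isIn [c] ['+', '-', '*', '/', '%'] = false := by
      rw [PySem.Chars.isIn_eq_false_iff]
      exact fun hin => h ((List.singleton_infix_iff c _).mp hin)
    simp [h, h2]

theorem loop_invariant (cs : List Char) : ∀ (k i last : Nat) (ops opnds : List String),
    cs.length - i = k → last ≤ i → i ≤ cs.length →
    ((PySem.List.pyRange (i : Int) ((cs.length : Nat) : Int) 1).foldl (pvStepA cs) (ops, opnds, (last : Int))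
       = (((cs.drop i).foldl pvStepB (ops, opnds, (cs.drop last).take (i - last))).1,
          ((cs.drop i).foldl pvStepB (ops, opnds, (cs.drop last).take (i - last))).2.1,
          ((cs.length - ((cs.drop i).foldl pvStepB (ops, opnds, (cs.drop last).take (i - last))).2.2.length : Nat) : Int)))
    ∧ ((cs.drop i).foldl pvStepB (ops, opnds, (cs.drop last).take (i - last))).2.2
        = cs.drop (cs.length - ((cs.drop i).foldl pvStepB (ops, opnds, (cs.drop last).take (i - last))).2.2.length) := by
  intro k
  induction k with
  | zero =>
    intro i last ops opnds hk hlast hi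
    have hin : i = cs.length := by omega
    subst hin
    rw [PySem.List.pyRange_one_eq_nil (le_refl _), List.drop_length]
    simp only [List.foldl_nil]
    have htake : (cs.drop last).take (cs.length - last) = cs.drop last := by
      apply List.take_of_length_le; simp
    have hlen : ((cs.drop last).take (cs.length - last)).length = cs.length - last := by
      simp [htake]
    constructor
    · simp only [hlen]
      congr 2
      omega
    · rw [hlen, htake]
      congr 1
      omega
  | succ k ih =>
    intro i last ops opnds hk hlast hi
    have hilt : i < cs.length := by omega
    rw [PySem.List.pyRange_one_cons (by exact_mod_cast hilt),
        List.drop_eq_getElem_cons hilt]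
    simp only [List.foldl_cons]
    have hA : pvStepA cs (ops, opnds, (last : Int)) (i : Int)
        = if pvIsOperacionA ['+', '-', '*', '/', '%'] cs[i] then
            (ops ++ [String.ofList [cs[i]]],
             opnds ++ [String.ofList ((cs.drop last).take (i - last))], ((i : Int) + 1))
          else (ops, opnds, (last : Int)) := by
      simp only [pvStepA]
      rw [PySem.List.pyGetD_of_nonneg cs ' ' (by positivity)]
      rw [PySem.List.slice_natCast]
      simp [List.getD_eq_getElem?_getD, hilt]
    have hB : pvStepB (ops, opnds, (cs.drop last).take (i - last)) cs[i]
        = if pvIsOperacionA ['+', '-', '*', '/', '%'] cs[i] then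
            (ops ++ [String.ofList [cs[i]]],
             opnds ++ [String.ofList ((cs.drop last).take (i - last))], ([] : List Char))
          else (ops, opnds, (cs.drop last).take (i - last) ++ [cs[i]]) := by
      simp only [pvStepB, isOp_eq]
    rw [hA, hB]
    by_cases hc : pvIsOperacionA ['+', '-', '*', '/', '%'] cs[i] = true
    · rw [if_pos hc, if_pos hc]
      have hcast : ((i : Int) + 1) = ((i + 1 : Nat) : Int) := by push_cast; ring
      rw [hcast]
      have hih := ih (i + 1) (i + 1) (ops ++ [String.ofList [cs[i]]])
        (opnds ++ [String.ofList ((cs.drop last).take (i - last))]) (by omega) (by omega) (by omega)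
      simpa using hih
    · rw [if_neg hc, if_neg hc]
      have hcur : (cs.drop last).take (i - last) ++ [cs[i]] = (cs.drop last).take (i + 1 - last) := by
        have h1 : i + 1 - last = (i - last) + 1 := by omega
        rw [h1, List.take_add_one]
        congr 1
        have h2 : (cs.drop last)[i - last]? = some cs[i] := by
          rw [List.getElem?_drop]
          have h3 : last + (i - last) = i := by omega
          rw [h3]
          exact List.getElem?_eq_getElem hilt
        simp [h2]
      rw [hcur]
      have hcast : ((i : Int) + 1) = ((i + 1 : Nat) : Int) := by push_cast; ring
      rw [hcast]
      exact ih (i + 1) last ops opnds (by omega) (by omega) (by omega)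

-- ===== VERDICT (by name: the statement is the Claim_ definition above) =====
theorem encontrar_operaciones_spec : Claim_equal_encontrar_operaciones := by
  unfold Claim_equal_encontrar_operaciones
  intro s _
  unfold Spec_encontrar_operaciones encontrar_operaciones encontrar_operaciones_alt
  have h := loop_invariant s.toList s.toList.length 0 0 [] [] (by omega) (by omega) (by omega)
  simp only [List.drop_zero, Nat.sub_zero, List.take_zero, Nat.cast_zero] at h
  obtain ⟨h1, h2⟩ := h
  rw [PySem.Str.len_eq]
  dsimp only
  rcases hr : s.toList.foldl pvStepB ([], [], []) with ⟨ops', opnds', act'⟩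
  rw [hr] at h1 h2
  simp only at h1 h2
  rw [h1]
  dsimp only
  have hlenle : act'.length ≤ s.toList.length := by
    conv_lhs => rw [h2]
    rw [List.length_drop]
    omega
  by_cases hne : act' = []
  · subst hne
    simp
  · have hlpos : 0 < act'.length := List.length_pos_iff.mpr hne
    have hcond : ((s.toList.length - act'.length : Nat) : Int) ≠ ((s.toList.length : Nat) : Int) := by
      intro hcontra
      have : s.toList.length - act'.length = s.toList.length := by exact_mod_cast hcontra
      omega
    rw [if_pos hcond, if_pos hne, PySem.List.slice_from_natCast, ← h2]
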